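-- pv_equiv track=rewrite | github.com/alantaylor02/sokoban-game | TP3/soko.py | juego_ganado
-- ===== SOURCE A (Python) =====
-- CAJA = "$"
--
-- OBJETIVO_Y_CAJA = "*"
--
-- def juego_ganado(grilla):
--
--     cajas = 0
--     cajas_y_objetivos = 0
--
--     for f in range(len(grilla)):
--         for c in range(len(grilla[0])):
--
--             if grilla[f][c] == CAJA:
--                 cajas += 1
--
--             elif grilla[f][c] == OBJETIVO_Y_CAJA:
--                 cajas_y_objetivos += 1
--                 cajas += 1
--
--     return cajas == cajas_y_objetivos
-- ===== SOURCE B (Python) =====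
-- CAJA = "$"
--
-- def juego_ganado(grilla):
--     ancho = len(grilla[0]) if grilla else 0
--     for fila in grilla:
--         for c in range(ancho):
--             if fila[c] == CAJA:
--                 return False
--     return True
-- ===== Notes on version B (the rewrite author's own statement) =====
-- stated objective: simpler
-- what changed: B drops both counters: since every '*' increments both counts, A's equality holds iff there is no plain '$' cell, so B short-circuits with an early return False at the first '$' found (scanning the same width-of-first-row window).
import Mathlib
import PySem

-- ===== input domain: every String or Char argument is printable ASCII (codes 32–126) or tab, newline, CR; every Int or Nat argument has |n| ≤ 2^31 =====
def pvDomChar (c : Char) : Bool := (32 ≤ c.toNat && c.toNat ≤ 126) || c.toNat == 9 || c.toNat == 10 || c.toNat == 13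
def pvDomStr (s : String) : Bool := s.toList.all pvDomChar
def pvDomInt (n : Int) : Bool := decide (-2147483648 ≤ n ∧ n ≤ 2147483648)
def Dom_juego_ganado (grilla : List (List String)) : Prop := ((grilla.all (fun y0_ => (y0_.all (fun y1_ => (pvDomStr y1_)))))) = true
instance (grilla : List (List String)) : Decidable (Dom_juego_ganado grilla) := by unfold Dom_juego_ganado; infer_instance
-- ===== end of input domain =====

-- B replaces A's two counters (boxes vs boxes-on-goals) by a direct short-circuit scan for a plain '$' cell: the counts are equal iff none exists.


-- ===== PORT A =====
def juego_ganado (grilla : List (List String)) : Bool :=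
  let counts : Int × Int :=
    (PySem.List.pyRange 0 (PySem.List.len grilla)).foldl
      (fun (st : Int × Int) f =>
        (PySem.List.pyRange 0 (PySem.List.len (PySem.List.pyGetD grilla 0 []))).foldl
          (fun (st : Int × Int) c =>
            let cell := PySem.List.pyGetD (PySem.List.pyGetD grilla f []) c ""
            if cell == "$" then (st.1 + 1, st.2)
            else if cell == "*" then (st.1 + 1, st.2 + 1)
            else st)
          st)
      (0, 0)
  counts.1 == counts.2

-- ===== PORT B =====
def juego_ganado_alt (grilla : List (List String)) : Bool :=
  let ancho := (grilla.headD []).length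
  grilla.all (fun fila =>
    (List.range ancho).all (fun c => !(PySem.List.pyGetD fila (c : Int) "" == "$")))

-- ===== PRECONDITION & SPEC =====
-- Pre_ excludes ragged grids with a row shorter than the first row, on which Python A raises IndexError.
def Pre_juego_ganado (grilla : List (List String)) : Prop :=
  ∀ fila ∈ grilla, (grilla.headD []).length ≤ fila.length
instance (grilla : List (List String)) : Decidable (Pre_juego_ganado grilla) := by unfold Pre_juego_ganado; infer_instance

def pvWitness_juego_ganado : List (List String) := [["*", "."], ["@", "*"]]

def Spec_juego_ganado (grilla : List (List String)) (out : Bool) : Prop := out = juego_ganado_alt grilla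
instance (grilla : List (List String)) (out : Bool) : Decidable (Spec_juego_ganado grilla out) := by unfold Spec_juego_ganado; infer_instance

-- ===== CLAIM (what is proved, stated in full; the proofs are below) =====
def Claim_equal_juego_ganado : Prop := ∀ (grilla : List (List String)), Dom_juego_ganado grilla → Pre_juego_ganado grilla → Spec_juego_ganado grilla (juego_ganado grilla)

-- ===== LEMMAS AND PROOFS =====

-- reading a prefix by index equals List.take
lemma map_getD_range_eq_take (xs : List String) (w : Nat) (h : w ≤ xs.length) :
    (List.range w).map (fun k => xs.getD k "") = xs.take w := by
  apply List.ext_getElem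
  · simp [Nat.min_eq_left h]
  · intro i h1 h2
    have hi : i < xs.length := by simp at h2; omega
    simp [List.getD_eq_getElem?_getD, List.getElem?_eq_getElem hi]

-- A's per-row counter update: the difference of the two counters grows by the number of plain '$' cells
lemma foldl_cells_diff (cells : List String) : ∀ st : Int × Int,
    (cells.foldl
      (fun (st : Int × Int) cell =>
        if cell == "$" then (st.1 + 1, st.2)
        else if cell == "*" then (st.1 + 1, st.2 + 1)
        else st) st).1
    - (cells.foldl
      (fun (st : Int × Int) cell =>
        if cell == "$" then (st.1 + 1, st.2)
        else if cell == "*" then (st.1 + 1, st.2 + 1)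
        else st) st).2
    = st.1 - st.2 + ((cells.countP (fun c => c == "$") : Nat) : Int) := by
  induction cells with
  | nil => intro st; simp
  | cons x t ih =>
    intro st
    simp only [List.foldl_cons, List.countP_cons]
    split_ifs with h1 h2
    · rw [ih]; push_cast; ring
    · rw [ih]; push_cast; ring
    · rw [ih]; push_cast; ring

-- A's inner index loop over range(ancho) is the counter fold over the row's prefix
lemma inner_loop_eq (fila : List String) (ancho : Nat) (h : ancho ≤ fila.length) (st : Int × Int) :
    (PySem.List.pyRange 0 (ancho : Int)).foldl
      (fun (st : Int × Int) c =>
        let cell := PySem.List.pyGetD fila c ""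
        if cell == "$" then (st.1 + 1, st.2)
        else if cell == "*" then (st.1 + 1, st.2 + 1)
        else st) st
    = (fila.take ancho).foldl
      (fun (st : Int × Int) cell =>
        if cell == "$" then (st.1 + 1, st.2)
        else if cell == "*" then (st.1 + 1, st.2 + 1)
        else st) st := by
  rw [PySem.List.pyRange_zero_nat, List.foldl_map]
  rw [← map_getD_range_eq_take fila ancho h, List.foldl_map]
  simp [PySem.List.pyGetD_natCast]

-- A's whole nested loop: counter difference = total number of plain '$' cells in the scanned window
lemma rows_diff (ancho : Nat) : ∀ (rows : List (List String)),
    (∀ fila ∈ rows, ancho ≤ fila.length) →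
    ∀ st : Int × Int,
    (rows.foldl
      (fun (st : Int × Int) fila =>
        (PySem.List.pyRange 0 (ancho : Int)).foldl
          (fun (st : Int × Int) c =>
            let cell := PySem.List.pyGetD fila c ""
            if cell == "$" then (st.1 + 1, st.2)
            else if cell == "*" then (st.1 + 1, st.2 + 1)
            else st) st) st).1
    - (rows.foldl
      (fun (st : Int × Int) fila =>
        (PySem.List.pyRange 0 (ancho : Int)).foldl
          (fun (st : Int × Int) c =>
            let cell := PySem.List.pyGetD fila c ""
            if cell == "$" then (st.1 + 1, st.2)
            else if cell == "*" then (st.1 + 1, st.2 + 1)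
            else st) st) st).2
    = st.1 - st.2 + ((((rows.map (fun fila => (fila.take ancho).countP (fun c => c == "$"))).sum : Nat) : Int)) := by
  intro rows
  induction rows with
  | nil => intro _ st; simp
  | cons r rs ih =>
    intro h st
    simp only [List.foldl_cons, List.map_cons, List.sum_cons]
    rw [ih (fun fila hf => h fila (List.mem_cons_of_mem _ hf))]
    rw [inner_loop_eq r ancho (h r List.mem_cons_self) st]
    rw [foldl_cells_diff]
    push_cast
    ring

-- B's per-row scan tests exactly the same prefix
lemma alt_row_eq (fila : List String) (ancho : Nat) (h : ancho ≤ fila.length) :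
    ((List.range ancho).all (fun c => !(PySem.List.pyGetD fila (c : Int) "" == "$")))
    = (fila.take ancho).all (fun cell => !(cell == "$")) := by
  rw [← map_getD_range_eq_take fila ancho h, List.all_map]
  simp [Function.comp_def, PySem.List.pyGetD_natCast]

-- ===== VERDICT (by name: the statement is the Claim_ definition above) =====
theorem juego_ganado_spec : Claim_equal_juego_ganado := by
  intro grilla _ hpre
  unfold Spec_juego_ganado juego_ganado juego_ganado_alt
  cases grilla with
  | nil => decide
  | cons r rs =>
    have hget0 : PySem.List.pyGetD (r :: rs) (0 : Int) [] = r := by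
      simp [pysem]
    have hlen : PySem.List.len (PySem.List.pyGetD (r :: rs) (0 : Int) []) = (r.length : Int) := by
      rw [hget0]; simp [pysem]
    simp only [hlen, List.headD_cons]
    rw [PySem.List.foldl_pyRange_zero_pyGetD (r :: rs) []
      (fun (st : Int × Int) fila =>
        (PySem.List.pyRange 0 (r.length : Int)).foldl
          (fun (st : Int × Int) c =>
            let cell := PySem.List.pyGetD fila c ""
            if cell == "$" then (st.1 + 1, st.2)
            else if cell == "*" then (st.1 + 1, st.2 + 1)
            else st) st) ((0 : Int), (0 : Int))]
    have hpre' : ∀ fila ∈ (r :: rs), r.length ≤ fila.length := by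
      intro fila hf
      simpa using hpre fila hf
    have hdiff := rows_diff r.length (r :: rs) hpre' ((0 : Int), (0 : Int))
    dsimp only at hdiff
    have hrow : ∀ fila ∈ (r :: rs),
        ((∀ c ∈ List.range r.length, (!(PySem.List.pyGetD fila (c : Int) "" == "$")) = true)
          ↔ (∀ cell ∈ fila.take r.length, (!(cell == "$")) = true)) := by
      intro fila hf
      have h := alt_row_eq fila r.length (hpre' fila hf)
      rw [Bool.eq_iff_iff] at h
      simpa only [List.all_eq_true] using h
    rw [Bool.eq_iff_iff]
    simp only [List.all_eq_true]
    constructor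
    · intro heq fila hf c hc
      have h12 : _ = _ := eq_of_beq heq
      have hsum0 : ((r :: rs).map (fun fila => (fila.take r.length).countP (fun c => c == "$"))).sum = 0 := by
        have hz : ((((r :: rs).map (fun fila => (fila.take r.length).countP (fun c => c == "$"))).sum : Nat) : Int) = 0 := by
          omega
        exact_mod_cast hz
      have hcnt0 : (fila.take r.length).countP (fun c => c == "$") = 0 :=
        List.sum_eq_zero_iff.mp hsum0 _ (List.mem_map_of_mem hf)
      exact (hrow fila hf).mpr
        (fun cell hcell => by simpa using List.countP_eq_zero.mp hcnt0 cell hcell) c hc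
    · intro hall
      have hsum0 : ((r :: rs).map (fun fila => (fila.take r.length).countP (fun c => c == "$"))).sum = 0 := by
        apply List.sum_eq_zero_iff.mpr
        intro n hn
        rcases List.mem_map.mp hn with ⟨fila, hf, rfl⟩
        apply List.countP_eq_zero.mpr
        intro cell hc
        have hb := (hrow fila hf).mp (fun c hc' => hall fila hf c hc') cell hc
        simpa using hb
      rw [hsum0] at hdiff
      apply beq_iff_eq.mpr
      omega
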